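-- pv_equiv track=rewrite | github.com/foreverxujiahuan/algorithm | 竞赛/A104/D.py | sumOfPower
-- ===== SOURCE A (Python) =====
-- from typing import List
--
-- def sumOfPower(nums: List[int]) -> int:
--     nums.sort()
--     ans = 0
--     pre_sum = [nums[0]]
--     s = nums[0]
--     for i, n in enumerate(nums):
--         if i == 0:
--             continue
--         else:
--             pre_sum.append(s + n)
--             s += pre_sum[-1]
--     for i, n in enumerate(nums):
--         ans += n * n * pre_sum[i]
--         ans = ans % (10 ** 9 + 7)
--     return ans
-- ===== SOURCE B (Python) =====
-- def sumOfPower(nums):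
--     # Fix the MINIMUM of each group instead of the maximum: walk the sorted
--     # array right-to-left carrying t = sum over already-seen (larger) elements
--     # of a_i^2 * 2^(distance-1) mod M, so each element contributes a^3 + a*t.
--     # All state is kept reduced mod M, so intermediates stay bounded.
--     M = 10 ** 9 + 7
--     nums.sort()
--     t = 0
--     ans = 0
--     for a in reversed(nums):
--         ans = (ans + a * a * a + a * t) % M
--         t = (a * a + 2 * t) % M
--     return ans
-- ===== Notes on version B (the rewrite author's own statement) =====
-- stated objective: alternative
-- what changed: B fixes the minimum of each group instead of the maximum: it walks the sorted array right-to-left carrying a mod-reduced weighted sum of squares t (t = a^2 + 2t each step) and adds a^3 + a*t per element, whereas A builds the unreduced pre_sum prefix list left-to-right and then multiplies each square by it; B keeps every intermediate below the modulus instead of A's prefix values that double in size every step.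
import Mathlib
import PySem

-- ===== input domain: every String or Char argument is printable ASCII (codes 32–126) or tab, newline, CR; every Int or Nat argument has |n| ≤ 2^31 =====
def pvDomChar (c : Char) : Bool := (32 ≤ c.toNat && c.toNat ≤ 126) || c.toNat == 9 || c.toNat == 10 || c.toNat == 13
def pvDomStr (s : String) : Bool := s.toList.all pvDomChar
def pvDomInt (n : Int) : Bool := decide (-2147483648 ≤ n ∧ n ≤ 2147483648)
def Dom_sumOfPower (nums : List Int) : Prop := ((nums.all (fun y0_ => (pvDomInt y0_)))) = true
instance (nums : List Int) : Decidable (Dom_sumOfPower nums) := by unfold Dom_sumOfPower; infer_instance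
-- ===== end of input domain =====

-- B fixes the MINIMUM of each group instead of the maximum: it walks the sorted list
-- right-to-left with a mod-reduced weighted square-sum, instead of A's left-to-right
-- prefix-sum pass; equivalence is about the RETURN value only (both Pythons sort
-- `nums` in place, the same observable mutation).

-- ===== PORT A =====
def sumOfPower (nums : List Int) : Int :=
  let nums := PySem.List.sorted nums id false
  let ans : Int := 0
  let preSum : List Int := [PySem.List.pyGetD nums 0 0]
  let s : Int := PySem.List.pyGetD nums 0 0
  let st := (PySem.List.enumerate nums).foldl
    (fun (st : List Int × Int) p =>
      if p.1 == 0 then st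
      else
        let preSum := st.1 ++ [st.2 + p.2]
        let s := st.2 + PySem.List.pyGetD preSum (-1) 0
        (preSum, s))
    (preSum, s)
  let ans := (PySem.List.enumerate nums).foldl
    (fun ans p => PySem.Int.mod (ans + p.2 * p.2 * PySem.List.pyGetD st.1 p.1 0) (10 ^ 9 + 7))
    ans
  ans

-- ===== PORT B =====
def sumOfPower_alt (nums : List Int) : Int :=
  let M : Int := 10 ^ 9 + 7
  let nums := PySem.List.sorted nums id false
  let st := nums.reverse.foldl
    (fun (st : Int × Int) a =>
      (PySem.Int.mod (a * a + 2 * st.1) M, PySem.Int.mod (st.2 + a * a * a + a * st.1) M))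
    (0, 0)
  st.2

-- ===== PRECONDITION & SPEC =====
-- Pre_ excludes only the empty list, on which A raises IndexError at the initial
-- first-element access (B naturally returns 0, the empty sum, there).
def Pre_sumOfPower (nums : List Int) : Prop := nums ≠ []
instance (nums : List Int) : Decidable (Pre_sumOfPower nums) := by unfold Pre_sumOfPower; infer_instance
def pvWitness_sumOfPower : List Int := ([2, 1, 4])

def Spec_sumOfPower (nums : List Int) (out : Int) : Prop := out = sumOfPower_alt nums
instance (nums : List Int) (out : Int) : Decidable (Spec_sumOfPower nums out) := by unfold Spec_sumOfPower; infer_instance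

-- ===== CLAIM (what is proved, stated in full; the proofs are below) =====
def Claim_equal_sumOfPower : Prop := ∀ (nums : List Int), Dom_sumOfPower nums → Pre_sumOfPower nums → Spec_sumOfPower nums (sumOfPower nums)

-- ===== LEMMAS AND PROOFS =====

-- the tail of A's pre_sum list, as generated from running prefix value s
def presTail (xs : List Int) (s : Int) : List Int :=
  match xs with
  | [] => []
  | n :: xs => (s + n) :: presTail xs (s + (s + n))

-- final value of A's running variable s after the build loop
def sEnd (xs : List Int) (s : Int) : Int :=
  match xs with
  | [] => s
  | n :: xs => sEnd xs (s + (s + n))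

-- exact (unreduced) value accumulated by A's answer loop from prefix seed s
def SA (xs : List Int) (s : Int) : Int :=
  match xs with
  | [] => 0
  | n :: xs => n * n * (s + n) + SA xs (s + (s + n))

-- exact (unreduced) value accumulated by B's loop from weighted-square seed t
def SB (xs : List Int) (t : Int) : Int :=
  match xs with
  | [] => 0
  | a :: xs => a * a * a + a * t + SB xs (a * a + 2 * t)

-- exact final value of B's running variable t
def tEnd (xs : List Int) (t : Int) : Int :=
  match xs with
  | [] => t
  | a :: xs => tEnd xs (a * a + 2 * t)

-- A's first loop (over enumerate with start ≥ 1, so the i == 0 branch never fires)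
lemma buildA_eq (xs : List Int) : ∀ (k : Int) (ps : List Int) (s : Int), 1 ≤ k →
    (PySem.List.enumerate xs k).foldl
      (fun (st : List Int × Int) p =>
        if p.1 == 0 then st
        else (st.1 ++ [st.2 + p.2], st.2 + PySem.List.pyGetD (st.1 ++ [st.2 + p.2]) (-1) 0))
      (ps, s)
    = (ps ++ presTail xs s, sEnd xs s) := by
  induction xs with
  | nil => intro k ps s hk; simp [PySem.List.enumerate, presTail, sEnd]
  | cons n xs ih =>
    intro k ps s hk
    rw [PySem.List.enumerate_cons]
    simp only [List.foldl_cons]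
    have hne : (k == 0) = false := by simp; omega
    rw [hne]
    simp only [Bool.false_eq_true, if_false]
    rw [PySem.List.pyGetD_neg_one_append_singleton]
    rw [ih (k + 1) _ _ (by omega)]
    simp [presTail, sEnd]

-- index ps.length into ps ++ y :: t is y
lemma pyGetD_mid (ps : List Int) (y : Int) (t : List Int) :
    PySem.List.pyGetD (ps ++ y :: t) (ps.length : Int) 0 = y := by
  rw [PySem.List.pyGetD_natCast]
  simp [List.getD_eq_getElem?_getD]

-- fusion: A's second loop over the pre-built list equals a single fold carrying (s, ans)
lemma fuse_eq (xs : List Int) : ∀ (ps : List Int) (s ans : Int),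
    (PySem.List.enumerate xs (ps.length : Int)).foldl
      (fun ans p => PySem.Int.mod (ans + p.2 * p.2 * PySem.List.pyGetD (ps ++ presTail xs s) p.1 0) (10 ^ 9 + 7))
      ans
    = (xs.foldl
        (fun (st : Int × Int) n =>
          (st.1 + (st.1 + n), PySem.Int.mod (st.2 + n * n * (st.1 + n)) (10 ^ 9 + 7)))
        (s, ans)).2 := by
  induction xs with
  | nil => intro ps s ans; simp [PySem.List.enumerate]
  | cons n xs ih =>
    intro ps s ans
    rw [PySem.List.enumerate_cons]
    simp only [List.foldl_cons, presTail]
    rw [pyGetD_mid]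
    have hl : (ps.length : Int) + 1 = ((ps ++ [s + n]).length : Int) := by simp
    have hs : ps ++ (s + n) :: presTail xs (s + (s + n)) = (ps ++ [s + n]) ++ presTail xs (s + (s + n)) := by simp
    rw [hl, hs, ih]

lemma hMpos : (0 : Int) < 10 ^ 9 + 7 := by norm_num

-- a congruent argument gives the same Python mod
lemma modCong {x y : Int} (h : x % (10 ^ 9 + 7) = y % (10 ^ 9 + 7)) :
    PySem.Int.mod x (10 ^ 9 + 7) = PySem.Int.mod y (10 ^ 9 + 7) := by
  rw [PySem.Int.mod_eq_emod_of_pos hMpos, PySem.Int.mod_eq_emod_of_pos hMpos, h]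

lemma modAbsorb (c x : Int) :
    PySem.Int.mod (PySem.Int.mod c (10 ^ 9 + 7) + x) (10 ^ 9 + 7)
      = PySem.Int.mod (c + x) (10 ^ 9 + 7) := by
  rw [show PySem.Int.mod c (10 ^ 9 + 7) = c % (10 ^ 9 + 7) from PySem.Int.mod_eq_emod_of_pos hMpos]
  exact modCong (Int.emod_add_emod c (10 ^ 9 + 7) x)

lemma emod_self_modEq (t : Int) : t % (10 ^ 9 + 7) ≡ t [ZMOD (10 ^ 9 + 7)] :=
  Int.emod_emod_of_dvd t dvd_rfl

-- A's fused fold computes the exact sum SA, reduced mod M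
lemma A_char (xs : List Int) : ∀ (s c : Int),
    (xs.foldl
        (fun (st : Int × Int) n =>
          (st.1 + (st.1 + n), PySem.Int.mod (st.2 + n * n * (st.1 + n)) (10 ^ 9 + 7)))
        (s, PySem.Int.mod c (10 ^ 9 + 7))).2
      = PySem.Int.mod (c + SA xs s) (10 ^ 9 + 7) := by
  induction xs with
  | nil => intro s c; simp [SA]
  | cons n xs ih =>
    intro s c
    simp only [List.foldl_cons]
    rw [modAbsorb, ih]
    exact modCong (by rw [show c + n * n * (s + n) + SA xs (s + (s + n)) = c + SA (n :: xs) s from by simp [SA]; ring])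

-- B's fold computes the exact sum SB, reduced mod M
lemma B_char (ys : List Int) : ∀ (t c : Int),
    (ys.foldl
        (fun (st : Int × Int) a =>
          (PySem.Int.mod (a * a + 2 * st.1) (10 ^ 9 + 7),
           PySem.Int.mod (st.2 + a * a * a + a * st.1) (10 ^ 9 + 7)))
        (PySem.Int.mod t (10 ^ 9 + 7), PySem.Int.mod c (10 ^ 9 + 7))).2
      = PySem.Int.mod (c + SB ys t) (10 ^ 9 + 7) := by
  induction ys with
  | nil => intro t c; simp [SB]
  | cons a ys ih =>
    intro t c
    simp only [List.foldl_cons]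
    have ht := emod_self_modEq t
    have h1 : PySem.Int.mod (a * a + 2 * PySem.Int.mod t (10 ^ 9 + 7)) (10 ^ 9 + 7)
        = PySem.Int.mod (a * a + 2 * t) (10 ^ 9 + 7) := by
      rw [show PySem.Int.mod t (10 ^ 9 + 7) = t % (10 ^ 9 + 7) from PySem.Int.mod_eq_emod_of_pos hMpos]
      exact modCong (Int.ModEq.add_left (a * a) (Int.ModEq.mul_left 2 ht))
    have h2 : PySem.Int.mod (PySem.Int.mod c (10 ^ 9 + 7) + a * a * a + a * PySem.Int.mod t (10 ^ 9 + 7)) (10 ^ 9 + 7)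
        = PySem.Int.mod (c + a * a * a + a * t) (10 ^ 9 + 7) := by
      rw [show PySem.Int.mod t (10 ^ 9 + 7) = t % (10 ^ 9 + 7) from PySem.Int.mod_eq_emod_of_pos hMpos,
          show PySem.Int.mod c (10 ^ 9 + 7) = c % (10 ^ 9 + 7) from PySem.Int.mod_eq_emod_of_pos hMpos]
      exact modCong ((((emod_self_modEq c).add_right (a * a * a)).add (Int.ModEq.mul_left a ht)))
    rw [h1, h2, ih]
    exact modCong (by rw [show c + a * a * a + a * t + SB ys (a * a + 2 * t) = c + SB (a :: ys) t from by simp [SB]; ring])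

lemma SB_append_singleton (ys : List Int) : ∀ (a t : Int),
    SB (ys ++ [a]) t = SB ys t + a * a * a + a * tEnd ys t := by
  induction ys with
  | nil => intro a t; simp [SB, tEnd]
  | cons b ys ih => intro a t; simp only [List.cons_append, SB, tEnd, ih]; ring

lemma tEnd_append_singleton (ys : List Int) : ∀ (a t : Int),
    tEnd (ys ++ [a]) t = a * a + 2 * tEnd ys t := by
  induction ys with
  | nil => intro a t; simp [tEnd]
  | cons b ys ih => intro a t; simp only [List.cons_append, tEnd, ih]

-- the bridge: B's right-to-left exact sum equals A's left-to-right exact sum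
lemma bridge (xs : List Int) : ∀ (s : Int),
    SB xs.reverse 0 + s * tEnd xs.reverse 0 = SA xs s := by
  induction xs with
  | nil => intro s; simp [SB, tEnd, SA]
  | cons n xs ih =>
    intro s
    simp only [List.reverse_cons, SB_append_singleton, tEnd_append_singleton, SA]
    rw [← ih (s + (s + n))]
    ring

lemma mod_zero_self : (0 : Int) = PySem.Int.mod 0 (10 ^ 9 + 7) := by
  rw [PySem.Int.mod_eq_emod_of_pos hMpos]; simp

-- ===== VERDICT (by name: the statements are the Claim_ definitions above) =====
theorem sumOfPower_spec : Claim_equal_sumOfPower := by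
  intro nums _hd hpre
  unfold Spec_sumOfPower sumOfPower sumOfPower_alt
  have hne : PySem.List.sorted nums id false ≠ [] := by
    intro h
    have := PySem.List.sorted_perm nums (id : Int → Int) false
    rw [h] at this
    exact hpre (this.nil_eq).symm
  obtain ⟨a, rest, hs⟩ := List.exists_cons_of_ne_nil hne
  rw [hs]
  simp only [PySem.List.pyGetD_zero_cons, PySem.List.enumerate_cons, List.foldl_cons,
    List.reverse_cons]
  have h0 : ((0 : Int) == 0) = true := by decide
  rw [h0]
  simp only [if_true]
  rw [show (0 : Int) + 1 = 1 from by decide]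
  rw [buildA_eq rest 1 [a] a (by omega)]
  have h1 : PySem.List.enumerate rest (1 : Int) = PySem.List.enumerate rest (([a] : List Int).length : Int) := by norm_num
  rw [h1]
  have ha : PySem.List.pyGetD ([a] ++ presTail rest a) 0 0 = a := by
    simp [PySem.List.pyGetD_zero_cons]
  rw [ha, fuse_eq rest [a] a]
  rw [A_char rest a (0 + a * a * a)]
  rw [show ((0 : Int), (0 : Int)) = (PySem.Int.mod 0 (10 ^ 9 + 7), PySem.Int.mod 0 (10 ^ 9 + 7)) from by rw [← mod_zero_self]]
  rw [B_char (rest.reverse ++ [a]) 0 0]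
  exact modCong (by
    rw [SB_append_singleton]
    rw [show SB rest.reverse 0 + a * a * a + a * tEnd rest.reverse 0
        = (SB rest.reverse 0 + a * tEnd rest.reverse 0) + a * a * a from by ring]
    rw [bridge rest a]
    ring_nf)
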